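-- pv_equiv track=rewrite | github.com/salargtb/task_vrptw_2024 | LA/util_LA.py | create_buckets
-- ===== SOURCE A (Python) =====
-- def create_buckets(lower_bound, increment, upper_bound):
--     """
--     Creates demand buckets for a customer, starting at their demand.
--
--     Parameters:
--     - lower_bound (int): The total demand of the customer (du[u]).
--     - increment (int): The fixed increment for each bucket.
--     - upper_bound (int): The overall capacity (upper limit for d_plus).
--
--
--     Returns:
--     - List[Tuple[int, int]]: A list of tuples representing the (d_minus, d_plus) of each bucket.
--     """
--     buckets = []
--
--     current = lower_bound
--     i = 1
--     while current <= upper_bound: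
--         d_minus = current
--         d_plus = current + i * increment - 1
--
--         if d_plus > upper_bound:
--             d_plus = upper_bound
--
--         # Ensure that d_minus does not exceed d_plus
--         if d_minus > d_plus:
--             break
--
--         buckets.append((d_minus, d_plus))
--         current += i * increment
--         i += 1
--     return buckets
-- ===== SOURCE B (Python) =====
-- def create_buckets(lower_bound, increment, upper_bound):
--     # Two stages instead of scan-and-break: binary-search the bucket count k
--     # (the i-th bucket start lower_bound + increment*i*(i-1)//2 is monotone in i
--     # for increment > 0), then emit all k buckets from the closed form at once.
--     if increment <= 0 or lower_bound > upper_bound: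
--         return []
--     M = upper_bound - lower_bound
--     lo, hi = 1, M + 2  # invariant: bucket lo starts in range, bucket hi does not
--     while hi - lo > 1:
--         mid = (lo + hi) // 2
--         if increment * mid * (mid - 1) // 2 <= M:
--             lo = mid
--         else:
--             hi = mid
--     return [(lower_bound + increment * i * (i - 1) // 2,
--              min(lower_bound + increment * i * (i + 1) // 2 - 1, upper_bound))
--             for i in range(1, lo + 1)]
-- ===== Notes on version B (the rewrite author's own statement) =====
-- stated objective: alternative
-- what changed: Instead of A's sequential scan-and-break with a running accumulator, B binary-searches the bucket count k on the monotone closed-form start formula and then emits all k buckets in one comprehension.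
import Mathlib
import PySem

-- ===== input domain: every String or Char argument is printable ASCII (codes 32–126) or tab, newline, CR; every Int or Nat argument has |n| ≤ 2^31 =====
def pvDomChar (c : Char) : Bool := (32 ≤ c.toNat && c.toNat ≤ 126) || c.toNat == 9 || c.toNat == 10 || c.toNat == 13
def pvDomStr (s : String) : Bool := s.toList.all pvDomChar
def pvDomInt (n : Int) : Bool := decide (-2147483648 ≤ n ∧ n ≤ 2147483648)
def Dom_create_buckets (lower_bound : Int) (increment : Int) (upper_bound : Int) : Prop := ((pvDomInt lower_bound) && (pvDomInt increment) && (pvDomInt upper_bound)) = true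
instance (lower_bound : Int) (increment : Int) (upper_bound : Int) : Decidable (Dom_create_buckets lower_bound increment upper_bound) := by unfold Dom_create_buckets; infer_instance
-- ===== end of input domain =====

-- B replaces A's scan-and-break accumulation by a binary search for the bucket
-- count followed by one closed-form comprehension (objective: alternative).

-- ===== PORT A =====
-- A's while loop: state (buckets, current, i); terminates because each recursive
-- step only happens when i * increment ≥ 1, so current strictly increases.
def create_buckets_loop (upper_bound increment : Int)
    (buckets : List (Int × Int)) (current i : Int) : List (Int × Int) :=
  if _h : current ≤ upper_bound then
    let d_minus := current
    let d_plus0 := current + i * increment - 1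
    let d_plus := if d_plus0 > upper_bound then upper_bound else d_plus0
    if _h2 : d_minus > d_plus then buckets
    else create_buckets_loop upper_bound increment
      (buckets ++ [(d_minus, d_plus)]) (current + i * increment) (i + 1)
  else buckets
termination_by (upper_bound + 1 - current).toNat
decreasing_by
  simp only [d_minus, d_plus, d_plus0, not_lt] at _h2
  split at _h2 <;> omega

def create_buckets (lower_bound : Int) (increment : Int) (upper_bound : Int) : List (Int × Int) :=
  create_buckets_loop upper_bound increment [] lower_bound 1

-- ===== PORT B =====
-- B's binary-search while loop; fuel = hi - lo, which strictly decreases.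
def create_buckets_alt_bs (inc M : Int) : Nat → Int → Int → Int
  | 0, lo, _ => lo
  | n + 1, lo, hi =>
    if hi - lo > 1 then
      let mid := PySem.Int.floordiv (lo + hi) 2
      if PySem.Int.floordiv (inc * mid * (mid - 1)) 2 ≤ M then
        create_buckets_alt_bs inc M n mid hi
      else
        create_buckets_alt_bs inc M n lo mid
    else lo

def create_buckets_alt (lower_bound : Int) (increment : Int) (upper_bound : Int) : List (Int × Int) :=
  if increment ≤ 0 ∨ lower_bound > upper_bound then []
  else
    let M := upper_bound - lower_bound
    let k := create_buckets_alt_bs increment M (M + 1).toNat 1 (M + 2)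
    (PySem.List.pyRange 1 (k + 1) 1).map (fun i =>
      (lower_bound + PySem.Int.floordiv (increment * i * (i - 1)) 2,
       min (lower_bound + PySem.Int.floordiv (increment * i * (i + 1)) 2 - 1) upper_bound))

-- ===== PRECONDITION & SPEC =====
def Spec_create_buckets (lower_bound : Int) (increment : Int) (upper_bound : Int) (out : List (Int × Int)) : Prop := out = create_buckets_alt lower_bound increment upper_bound
instance (lower_bound : Int) (increment : Int) (upper_bound : Int) (out : List (Int × Int)) : Decidable (Spec_create_buckets lower_bound increment upper_bound out) := by unfold Spec_create_buckets; infer_instance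

-- ===== CLAIM (what is proved, stated in full; the proofs are below) =====
def Claim_equal_create_buckets : Prop := ∀ (lower_bound : Int) (increment : Int) (upper_bound : Int), Dom_create_buckets lower_bound increment upper_bound → Spec_create_buckets lower_bound increment upper_bound (create_buckets lower_bound increment upper_bound)

-- ===== LEMMAS AND PROOFS =====

-- Exact floor-division of a known double.
theorem fd_even (x t : Int) (h : x = 2 * t) : PySem.Int.floordiv x 2 = t := by
  rw [h, PySem.Int.floordiv_eq_ediv_of_pos (by omega)]
  omega

-- The bucket-start test in B's binary search, with the even product divided out.
theorem cond_iff (inc M m : Int) :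
    (PySem.Int.floordiv (inc * m * (m - 1)) 2 ≤ M) ↔ inc * m * (m - 1) ≤ 2 * M := by
  obtain ⟨t, ht⟩ := Int.even_mul_succ_self (m - 1)
  have hx : inc * m * (m - 1) = 2 * (inc * t) := by linear_combination inc * ht
  rw [fd_even _ _ hx]
  omega

-- The binary search returns the largest r with inc*r*(r-1) ≤ 2*M.
theorem bs_correct (inc M : Int) : ∀ (n : Nat) (lo hi : Int),
    1 ≤ lo → lo < hi → inc * lo * (lo - 1) ≤ 2 * M → ¬ inc * hi * (hi - 1) ≤ 2 * M →
    hi - lo ≤ (n : Int) →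
    1 ≤ create_buckets_alt_bs inc M n lo hi ∧
    inc * (create_buckets_alt_bs inc M n lo hi) * (create_buckets_alt_bs inc M n lo hi - 1) ≤ 2 * M ∧
    ¬ inc * (create_buckets_alt_bs inc M n lo hi + 1) * (create_buckets_alt_bs inc M n lo hi) ≤ 2 * M := by
  intro n
  induction n with
  | zero => intro lo hi h1 h2 _ _ hf; simp at hf; omega
  | succ n ih =>
    intro lo hi h1 h2 hlo hhi hf
    rw [create_buckets_alt_bs]
    by_cases hgap : hi - lo > 1
    · rw [if_pos hgap]
      have hmid : PySem.Int.floordiv (lo + hi) 2 = (lo + hi) / 2 :=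
        PySem.Int.floordiv_eq_ediv_of_pos (by omega)
      simp only [hmid]
      have hb1 : lo + 1 ≤ (lo + hi) / 2 := by omega
      have hb2 : (lo + hi) / 2 ≤ hi - 1 := by omega
      by_cases hc : inc * ((lo + hi) / 2) * ((lo + hi) / 2 - 1) ≤ 2 * M
      · rw [if_pos ((cond_iff inc M _).mpr hc)]
        exact ih _ hi (by omega) (by omega) hc hhi (by push_cast at hf ⊢; omega)
      · rw [if_neg (by rw [cond_iff]; exact hc)]
        exact ih lo _ h1 (by omega) hlo hc (by push_cast at hf ⊢; omega)
    · rw [if_neg hgap]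
      have : hi = lo + 1 := by omega
      subst this
      refine ⟨h1, hlo, ?_⟩
      have : inc * (lo + 1) * (lo + 1 - 1) = inc * (lo + 1) * lo := by ring
      rw [← this]; simpa using hhi

-- A's loop from the closed-form state equals the closed-form comprehension tail.
theorem loop_map (lb inc ub k : Int) (hinc : 1 ≤ inc) (hk1 : 1 ≤ k)
    (hkub : inc * k * (k - 1) ≤ 2 * (ub - lb))
    (hk2 : ¬ inc * (k + 1) * k ≤ 2 * (ub - lb)) :
    ∀ (n : Nat) (i current : Int) (acc : List (Int × Int)),
    1 ≤ i → i ≤ k + 1 → 2 * current = 2 * lb + inc * (i - 1) * i → k + 1 - i ≤ (n : Int) →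
    create_buckets_loop ub inc acc current i =
      acc ++ (PySem.List.pyRange i (k + 1) 1).map (fun j =>
        (lb + PySem.Int.floordiv (inc * j * (j - 1)) 2,
         min (lb + PySem.Int.floordiv (inc * j * (j + 1)) 2 - 1) ub)) := by
  intro n
  induction n with
  | zero =>
    intro i current acc hi1 hik hcur hf
    have hieq : i = k + 1 := by simp at hf; omega
    subst hieq
    have hcub : ¬ current ≤ ub := by nlinarith [hk2, hcur]
    rw [create_buckets_loop.eq_def, dif_neg hcub,
      PySem.List.pyRange_one_eq_nil (by omega)]
    simp
  | succ n ih =>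
    intro i current acc hi1 hik hcur hf
    by_cases hik' : i ≤ k
    · -- current ≤ ub since the i-th start is below the k-th start
      have hmono : inc * (i - 1) * i ≤ inc * k * (k - 1) := by
        have key : inc * k * (k - 1) - inc * (i - 1) * i = inc * ((k - i) * (k + i - 1)) := by
          ring
        have hpos : 0 ≤ inc * ((k - i) * (k + i - 1)) :=
          mul_nonneg (by omega) (mul_nonneg (by omega) (by omega))
        omega
      have hcub : current ≤ ub := by omega
      have hii : 1 ≤ i * inc := by
        have : 1 * 1 ≤ i * inc := mul_le_mul hi1 hinc (by omega) (by omega)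
        omega
      rw [create_buckets_loop.eq_def, dif_pos hcub]
      simp only
      rw [dif_neg (show ¬ current > (if current + i * inc - 1 > ub then ub
            else current + i * inc - 1) by split <;> omega)]
      rw [PySem.List.pyRange_one_cons (by omega), List.map_cons]
      have e1 : inc * i * (i - 1) = 2 * (current - lb) := by linear_combination -hcur
      have e2 : inc * i * (i + 1) = 2 * (current - lb + i * inc) := by linear_combination -hcur
      have hmin : (if current + i * inc - 1 > ub then ub else current + i * inc - 1)
          = min (current + i * inc - 1) ub := by split <;> omega
      rw [hmin, ih (i + 1) (current + i * inc) (acc ++ [(current, min (current + i * inc - 1) ub)])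
        (by omega) (by omega) (by linear_combination hcur) (by push_cast at hf ⊢; omega)]
      simp
      omega
    · have hieq : i = k + 1 := by omega
      subst hieq
      have hcub : ¬ current ≤ ub := by nlinarith [hk2, hcur]
      rw [create_buckets_loop.eq_def, dif_neg hcub,
        PySem.List.pyRange_one_eq_nil (by omega)]
      simp

-- A returns [] for non-positive increment (first iteration breaks, or guard fails).
theorem loopA_nonpos (lb inc ub : Int) (hinc : inc ≤ 0) :
    create_buckets_loop ub inc [] lb 1 = [] := by
  rw [create_buckets_loop.eq_def]
  split
  · rw [dif_pos (by split <;> omega)]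
  · rfl

-- ===== VERDICT (by name: the statement is the Claim_ definition above) =====
theorem create_buckets_spec : Claim_equal_create_buckets := by
  intro lb inc ub _
  unfold Spec_create_buckets create_buckets create_buckets_alt
  by_cases hbad : inc ≤ 0 ∨ lb > ub
  · rw [if_pos hbad]
    rcases hbad with hbad | hbad
    · exact loopA_nonpos lb inc ub hbad
    · rw [create_buckets_loop.eq_def, dif_neg (by omega)]
  · rw [if_neg hbad]
    rw [not_or, not_le, not_lt] at hbad
    obtain ⟨hinc, hlu⟩ := hbad
    set Mv := ub - lb with hM
    have hM0 : 0 ≤ Mv := by omega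
    have hc1 : inc * 1 * (1 - 1) ≤ 2 * Mv := by
      have : inc * 1 * (1 - 1) = 0 := by ring
      omega
    have hcH : ¬ inc * (Mv + 2) * (Mv + 2 - 1) ≤ 2 * Mv := by
      have h1 : (Mv + 2) * (Mv + 1) ≥ 2 * Mv + 1 := by nlinarith
      have h2 : inc * ((Mv + 2) * (Mv + 1)) ≥ 1 * ((Mv + 2) * (Mv + 1)) :=
        mul_le_mul_of_nonneg_right hinc (by nlinarith)
      have h3 : inc * (Mv + 2) * (Mv + 2 - 1) = inc * ((Mv + 2) * (Mv + 1)) := by ring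
      omega
    obtain ⟨hk1, hkub, hk2⟩ := bs_correct inc Mv (Mv + 1).toNat 1 (Mv + 2)
      (by omega) (by omega) hc1 hcH (by omega)
    set k := create_buckets_alt_bs inc Mv (Mv + 1).toNat 1 (Mv + 2)
    exact loop_map lb inc ub k hinc hk1 (by omega) (by omega)
      k.toNat 1 lb [] (by omega) (by omega) (by ring) (by omega)
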